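-- pv_equiv track=rewrite | github.com/OdZarref/Kreator | kreator.py | calcular_senhas_permutacao
-- ===== SOURCE A (Python) =====
-- def calcular_senhas_permutacao(elementos):
--     """Contará, aproximadamente, quantas senhas serão escritas através do método de permutação.
--
--     Args:
--         elementos (list): São os nomes, sobrenomes e apelidos juntos em uma lista.
--
--     Returns:
--         int: Quantas senhas, aproximadamente serão geradas.
--     """
--     from math import factorial
--     from itertools import combinations
--
--     resultado = 0
--     p = len(elementos)
--
--     while p != 0:
--         total = 0
--         for combinacao in combinations(elementos, p):
--             total += 1
--
--         resultado += (factorial(p) * 8) * total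
--         p -= 1
--
--     return resultado
-- ===== SOURCE B (Python) =====
-- def calcular_senhas_permutacao(elementos):
--     """Closed-form: sum_{p=1}^{n} 8 * p! * C(n,p) = 8 * sum of falling factorials n*(n-1)*...*(n-p+1)."""
--     n = len(elementos)
--     total = 0
--     term = 1
--     for p in range(1, n + 1):
--         term *= n - p + 1
--         total += term
--     return 8 * total
-- ===== Notes on version B (the rewrite author's own statement) =====
-- stated objective: faster
-- what changed: Replaced the per-p enumeration of all C(n,p) combinations with a single O(n) loop accumulating falling factorials, using 8*p!*C(n,p) = 8*n*(n-1)*...*(n-p+1).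
import Mathlib
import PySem

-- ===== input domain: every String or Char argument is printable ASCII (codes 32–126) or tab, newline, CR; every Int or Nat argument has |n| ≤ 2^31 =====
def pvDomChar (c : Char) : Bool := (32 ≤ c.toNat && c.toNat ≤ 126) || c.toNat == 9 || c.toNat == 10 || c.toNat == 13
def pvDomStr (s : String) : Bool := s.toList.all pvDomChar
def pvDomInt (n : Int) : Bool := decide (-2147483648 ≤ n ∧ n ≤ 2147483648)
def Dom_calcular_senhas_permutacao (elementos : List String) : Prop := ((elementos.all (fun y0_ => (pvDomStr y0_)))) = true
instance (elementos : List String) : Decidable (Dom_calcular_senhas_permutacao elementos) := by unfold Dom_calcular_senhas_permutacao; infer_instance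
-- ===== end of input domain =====

-- B replaces A's exponential enumeration of all combinations with a single O(n)
-- accumulation of falling factorials (8·p!·C(n,p) = 8·n·(n-1)···(n-p+1)); objective: faster.

-- ===== PORT A =====
-- itertools.combinations(xs, p), transliterated as the standard recursive enumeration
-- (only the count of tuples matters to A; each tuple is produced explicitly, as in A).
def pyCombinations (xs : List String) (p : Nat) : List (List String) :=
  match xs, p with
  | _, 0 => [[]]
  | [], _ + 1 => []
  | x :: rest, q + 1 =>
      (pyCombinations rest q).map (fun c => x :: c) ++ pyCombinations rest (q + 1)

-- the 'while p != 0' loop: p counts down, resultado accumulates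
def calcAWhile (elementos : List String) : Nat → Int → Int
  | 0, resultado => resultado
  | p + 1, resultado =>
      let total : Int := (pyCombinations elementos (p + 1)).foldl (fun t _ => t + 1) 0
      calcAWhile elementos p (resultado + ((Nat.factorial (p + 1) : Int) * 8) * total)

def calcular_senhas_permutacao (elementos : List String) : Int :=
  calcAWhile elementos elementos.length 0

-- ===== PORT B =====
-- for p in range(1, n+1): term *= n - p + 1; total += term;  return 8 * total
def calcular_senhas_permutacao_alt (elementos : List String) : Int :=
  let n : Int := elementos.length
  let st := (PySem.List.pyRange 1 (n + 1) 1).foldl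
      (fun (s : Int × Int) (p : Int) =>
        let term := s.2 * (n - p + 1)
        (s.1 + term, term)) (0, 1)
  8 * st.1

-- ===== PRECONDITION & SPEC =====
def Spec_calcular_senhas_permutacao (elementos : List String) (out : Int) : Prop := out = calcular_senhas_permutacao_alt elementos
instance (elementos : List String) (out : Int) : Decidable (Spec_calcular_senhas_permutacao elementos out) := by unfold Spec_calcular_senhas_permutacao; infer_instance

-- ===== CLAIM (what is proved, stated in full; the proofs are below) =====
def Claim_equal_calcular_senhas_permutacao : Prop := ∀ (elementos : List String), Dom_calcular_senhas_permutacao elementos → Spec_calcular_senhas_permutacao elementos (calcular_senhas_permutacao elementos)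

-- ===== LEMMAS AND PROOFS =====

-- Σ_{k=1}^{p} n·(n-1)···(n-k+1), the common mathematical value of both loops
def sumDesc (n : Nat) : Nat → Nat
  | 0 => 0
  | p + 1 => Nat.descFactorial n (p + 1) + sumDesc n p

theorem pyCombinations_length (xs : List String) (p : Nat) :
    (pyCombinations xs p).length = Nat.choose xs.length p := by
  induction xs generalizing p with
  | nil => cases p <;> simp [pyCombinations]
  | cons x rest ih =>
      cases p with
      | zero => simp [pyCombinations]
      | succ q => simp [pyCombinations, ih, Nat.choose_succ_succ]

theorem foldl_count (l : List (List String)) (t : Int) :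
    l.foldl (fun t _ => t + 1) t = t + l.length := by
  induction l generalizing t with
  | nil => simp
  | cons a l ih => simp [List.foldl_cons, ih]; ring

theorem calcAWhile_eq (xs : List String) (p : Nat) (r : Int) :
    calcAWhile xs p r = r + 8 * (sumDesc xs.length p : Int) := by
  induction p generalizing r with
  | zero => simp [calcAWhile, sumDesc]
  | succ p ih =>
      rw [calcAWhile, ih, foldl_count, pyCombinations_length]
      have h : Nat.descFactorial xs.length (p + 1)
          = Nat.factorial (p + 1) * Nat.choose xs.length (p + 1) :=
        Nat.descFactorial_eq_factorial_mul_choose _ _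
      simp only [sumDesc]
      push_cast [h]
      ring

theorem bFold_eq (n p : Nat) (hp : p ≤ n) :
    (PySem.List.pyRange 1 ((p : Int) + 1) 1).foldl
      (fun (s : Int × Int) (q : Int) =>
        let term := s.2 * ((n : Int) - q + 1)
        (s.1 + term, term)) (0, 1)
    = ((sumDesc n p : Int), (Nat.descFactorial n p : Int)) := by
  induction p with
  | zero => simp [PySem.List.pyRange, sumDesc]
  | succ p ih =>
      have hb : (1 : Int) ≤ (p : Int) + 1 := by omega
      simp only [Nat.cast_add, Nat.cast_one]
      rw [PySem.List.pyRange_one_succ_right hb, List.foldl_append,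
        ih (Nat.le_of_succ_le hp)]
      have hsub : ((n - p : Nat) : Int) = (n : Int) - (p : Int) :=
        Int.ofNat_sub (Nat.le_of_succ_le hp)
      simp only [List.foldl_cons, List.foldl_nil, sumDesc, Nat.descFactorial_succ]
      push_cast [hsub]
      refine Prod.ext ?_ ?_ <;> simp <;> ring

-- ===== VERDICT (by name: the statement is the Claim_ definition above) =====
theorem calcular_senhas_permutacao_spec : Claim_equal_calcular_senhas_permutacao := by
  intro elementos _
  show _ = _
  unfold calcular_senhas_permutacao calcular_senhas_permutacao_alt
  dsimp only
  rw [calcAWhile_eq, bFold_eq elementos.length elementos.length le_rfl]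
  ring
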